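-- pv_equiv track=rewrite | github.com/Angus1976/superinsight1225 | src/ai/post_validation.py | _check_group_consistency
-- ===== SOURCE A (Python) =====
-- from typing import Dict, Any, List, Optional, Tuple, Set, Callable
--
-- def _check_group_consistency(
--
--     annotations: List[Dict[str, Any]],
-- ) -> bool:
--     """Check if annotations in a group are consistent."""
--     if not annotations:
--         return True
--
--     first_label = annotations[0].get("annotation_data", {}).get("label")
--
--     for ann in annotations[1:]:
--         label = ann.get("annotation_data", {}).get("label")
--         if label != first_label:
--             return False
--
--     return True
-- ===== SOURCE B (Python) =====
-- def _check_group_consistency(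
--     annotations,
-- ) -> bool:
--     """Check if annotations in a group are consistent."""
--     labels = {a.get("annotation_data", {}).get("label") for a in annotations}
--     return len(labels) <= 1
-- ===== Notes on version B (the rewrite author's own statement) =====
-- stated objective: simpler
-- what changed: Replaces the first-label/early-exit comparison loop (with a special empty case) by a one-line set comprehension collecting the distinct labels and checking that there is at most one.
import Mathlib
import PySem

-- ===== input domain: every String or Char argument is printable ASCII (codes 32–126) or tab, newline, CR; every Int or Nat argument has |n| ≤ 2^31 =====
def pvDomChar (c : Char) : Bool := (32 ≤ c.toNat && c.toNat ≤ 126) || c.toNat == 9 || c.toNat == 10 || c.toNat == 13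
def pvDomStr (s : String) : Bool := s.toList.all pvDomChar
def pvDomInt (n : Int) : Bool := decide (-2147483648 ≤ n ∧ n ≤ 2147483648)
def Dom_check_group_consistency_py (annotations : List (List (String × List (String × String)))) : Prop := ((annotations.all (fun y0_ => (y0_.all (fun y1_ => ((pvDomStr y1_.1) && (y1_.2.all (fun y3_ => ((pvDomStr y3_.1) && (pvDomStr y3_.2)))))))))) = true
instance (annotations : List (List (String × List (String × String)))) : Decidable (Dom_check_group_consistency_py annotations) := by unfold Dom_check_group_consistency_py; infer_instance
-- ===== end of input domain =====

-- B collects the distinct labels into a set and checks its size; A compares every label to the first with an early exit.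

-- shared helper: ann.get("annotation_data", {}).get("label")
def pvLabel (ann : List (String × List (String × String))) : Option String :=
  (PySem.Dict.mk ((PySem.Dict.mk ann).getD "annotation_data" [])).get? "label"

-- ===== PORT A =====
-- the 'for ann in annotations[1:]' loop with early return False
def pvCheckLoop (first : Option String) : List (List (String × List (String × String))) → Bool
  | [] => true
  | ann :: rest => if pvLabel ann ≠ first then false else pvCheckLoop first rest

def check_group_consistency_py (annotations : List (List (String × List (String × String)))) : Bool :=
  match annotations with
  | [] => true
  | a0 :: rest => pvCheckLoop (pvLabel a0) rest

-- ===== PORT B =====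
def check_group_consistency_py_alt (annotations : List (List (String × List (String × String)))) : Bool :=
  decide ((PySem.Set.ofList (annotations.map pvLabel)).length ≤ 1)

-- ===== PRECONDITION & SPEC =====
def Spec_check_group_consistency_py (annotations : List (List (String × List (String × String)))) (out : Bool) : Prop := out = check_group_consistency_py_alt annotations
instance (annotations : List (List (String × List (String × String)))) (out : Bool) : Decidable (Spec_check_group_consistency_py annotations out) := by unfold Spec_check_group_consistency_py; infer_instance

-- ===== CLAIM (what is proved, stated in full; the proofs are below) =====
def Claim_equal_check_group_consistency_py : Prop := ∀ (annotations : List (List (String × List (String × String)))), Dom_check_group_consistency_py annotations → Spec_check_group_consistency_py annotations (check_group_consistency_py annotations)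

-- ===== LEMMAS AND PROOFS =====

-- A's loop returns true iff every remaining label equals the first
theorem pvCheckLoop_eq_true_iff (f : Option String) (l : List (List (String × List (String × String)))) :
    pvCheckLoop f l = true ↔ ∀ a ∈ l, pvLabel a = f := by
  induction l with
  | nil => simp [pvCheckLoop]
  | cons a rest ih =>
      by_cases h : pvLabel a = f
      · simp [pvCheckLoop, h, ih]
      · simp [pvCheckLoop, h]

-- a duplicate-free list has length ≤ 1 iff any two members coincide
theorem pvNodupLenLeOne {α : Type} (s : List α) (h : s.Nodup) :
    s.length ≤ 1 ↔ ∀ a ∈ s, ∀ b ∈ s, a = b := by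
  match s with
  | [] => simp
  | [a] => simp
  | a :: b :: t =>
      have hne : a ≠ b := by
        simp [List.nodup_cons] at h
        exact fun hab => h.1.1 hab
      constructor
      · intro hl; simp at hl
      · intro hall
        exact absurd (hall a (by simp) b (by simp)) hne

theorem pvMainEq (annotations : List (List (String × List (String × String)))) :
    check_group_consistency_py annotations = check_group_consistency_py_alt annotations := by
  cases annotations with
  | nil => rfl
  | cons a0 rest =>
      unfold check_group_consistency_py check_group_consistency_py_alt
      have hnodup := PySem.Set.nodup_ofList ((a0 :: rest).map pvLabel)
      rw [Bool.eq_iff_iff, pvCheckLoop_eq_true_iff, decide_eq_true_iff,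
          pvNodupLenLeOne _ hnodup]
      constructor
      · intro hall x hx y hy
        rw [PySem.Set.mem_ofList] at hx hy
        simp at hx hy
        rcases hx with hx | ⟨ax, hax, rfl⟩ <;> rcases hy with hy | ⟨ay, hay, rfl⟩
        · rw [hx, hy]
        · rw [hx, hall ay hay]
        · rw [hy, hall ax hax]
        · rw [hall ax hax, hall ay hay]
      · intro hall a ha
        have h1 : pvLabel a ∈ PySem.Set.ofList ((a0 :: rest).map pvLabel) := by
          rw [PySem.Set.mem_ofList]; simp; right; exact ⟨a, ha, rfl⟩
        have h2 : pvLabel a0 ∈ PySem.Set.ofList ((a0 :: rest).map pvLabel) := by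
          rw [PySem.Set.mem_ofList]; simp
        exact hall _ h1 _ h2

-- ===== VERDICT (by name: the statement is the Claim_ definition above) =====
theorem check_group_consistency_py_spec : Claim_equal_check_group_consistency_py := by
  intro annotations _
  unfold Spec_check_group_consistency_py
  exact pvMainEq annotations
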